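-- pv_equiv track=rewrite | github.com/junfenglx/emws | nn/eval_test.py | segment_by_labels
-- ===== SOURCE A (Python) =====
-- def segment_by_labels(sentence, labels):
--     """
--     segment sentence by labels
--     :param sentence:
--     :param labels:
--     :return: list of words
--     """
--
--     tokens = []
--     sentence = ''.join(sentence)
--     for pos, c in enumerate(sentence):
--         if pos == 0:
--             tokens.append(c)
--         else:
--             label = labels[pos]
--             if label == 1:
--                 tokens[-1] += c
--             else:
--                 tokens.append(c)
--     return tokens
-- ===== SOURCE B (Python) =====
-- def segment_by_labels(sentence, labels):
--     """
--     segment sentence by labels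
--     :param sentence:
--     :param labels:
--     :return: list of words
--     """
--
--     s = ''.join(sentence)
--     if not s:
--         return []
--     starts = [0] + [pos for pos in range(1, len(s)) if labels[pos] != 1]
--     ends = starts[1:] + [len(s)]
--     return [s[a:b] for a, b in zip(starts, ends)]
-- ===== Notes on version B (the rewrite author's own statement) =====
-- stated objective: alternative
-- what changed: Instead of folding char-by-char while appending to or extending the last token in place, B computes the list of word-start positions (0 plus every position whose label is not 1) and returns the slices between consecutive starts.
import Mathlib
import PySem

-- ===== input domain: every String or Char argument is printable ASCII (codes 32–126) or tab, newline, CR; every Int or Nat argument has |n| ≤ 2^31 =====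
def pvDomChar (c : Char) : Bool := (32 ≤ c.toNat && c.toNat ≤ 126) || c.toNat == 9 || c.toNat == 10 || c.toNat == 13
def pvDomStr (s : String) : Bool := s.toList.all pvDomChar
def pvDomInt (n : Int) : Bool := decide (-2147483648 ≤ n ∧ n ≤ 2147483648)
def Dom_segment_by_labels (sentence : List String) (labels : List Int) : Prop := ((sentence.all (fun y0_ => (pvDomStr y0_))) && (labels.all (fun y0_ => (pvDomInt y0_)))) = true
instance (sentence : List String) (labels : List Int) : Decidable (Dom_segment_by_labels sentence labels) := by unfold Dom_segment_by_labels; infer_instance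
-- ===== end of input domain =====

-- B segments by computing word-start positions and slicing between them, instead of A's
-- char-by-char fold that extends or appends the last token; equivalence of return values is proved.

-- ===== PORT A =====

-- tokens[-1] += c
def pvAppendLast : List String → Char → List String
  | [], _ => []
  | [t], c => [t.push c]
  | t :: ts, c => t :: pvAppendLast ts c

-- the loop body of A
def pvStepA (labels : List Int) (tokens : List String) (pc : Int × Char) : List String :=
  if pc.1 == 0 then
    tokens ++ [String.ofList [pc.2]]
  else
    match PySem.List.pyGet? labels pc.1 with
    | some label =>
        if label == 1 then pvAppendLast tokens pc.2
        else tokens ++ [String.ofList [pc.2]]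
    | none => tokens ++ [String.ofList [pc.2]]      -- IndexError in Python; excluded by Pre_

def segment_by_labels (sentence : List String) (labels : List Int) : List String :=
  let s := PySem.Str.join "" sentence
  (PySem.List.enumerate s.toList 0).foldl (pvStepA labels) []

-- ===== PORT B =====

def segment_by_labels_alt (sentence : List String) (labels : List Int) : List String :=
  let s := PySem.Str.join "" sentence
  let cs := s.toList
  if cs.isEmpty then []
  else
    let n : Int := (cs.length : Int)
    let starts : List Int :=
      0 :: (PySem.List.pyRange 1 n 1).filter (fun pos => PySem.List.pyGet? labels pos != some 1)
    let ends : List Int := starts.drop 1 ++ [n]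
    (starts.zip ends).map (fun p => String.ofList (PySem.List.slice cs (some p.1) (some p.2)))

-- ===== PRECONDITION & SPEC =====
-- Pre_ excludes exactly the inputs on which Python A raises IndexError:
-- a joined sentence of length ≥ 2 with fewer labels than characters.
def Pre_segment_by_labels (sentence : List String) (labels : List Int) : Prop :=
  (PySem.Str.join "" sentence).toList.length ≤ 1 ∨
  (PySem.Str.join "" sentence).toList.length ≤ labels.length
instance (sentence : List String) (labels : List Int) : Decidable (Pre_segment_by_labels sentence labels) := by unfold Pre_segment_by_labels; infer_instance

def pvWitness_segment_by_labels : List String × List Int := (["ab", "c"], [0, 1, 0])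

def Spec_segment_by_labels (sentence : List String) (labels : List Int) (out : List String) : Prop := out = segment_by_labels_alt sentence labels
instance (sentence : List String) (labels : List Int) (out : List String) : Decidable (Spec_segment_by_labels sentence labels out) := by unfold Spec_segment_by_labels; infer_instance

-- ===== CLAIM (what is proved, stated in full; the proofs are below) =====
def Claim_equal_segment_by_labels : Prop := ∀ (sentence : List String) (labels : List Int), Dom_segment_by_labels sentence labels → Pre_segment_by_labels sentence labels → Spec_segment_by_labels sentence labels (segment_by_labels sentence labels)

-- ===== LEMMAS AND PROOFS =====

-- whether position p starts a new word (position 0 aside)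
def pvBnd (labels : List Int) (p : Int) : Bool := PySem.List.pyGet? labels p != some 1

-- reference segmentation of the characters at positions k, k+1, … (as char lists)
def pvSegM (labels : List Int) (k : Int) : List Char → List (List Char)
  | [] => []
  | c :: rest =>
    match pvSegM labels (k + 1) rest with
    | [] => [[c]]
    | g :: gs => if pvBnd labels (k + 1) then [c] :: g :: gs else (c :: g) :: gs

-- extend the last token of a token list by a char list
def pvExtLast : List String → List Char → List String
  | [], _ => []
  | [t], g => [String.ofList (t.toList ++ g)]
  | t :: ts, g => t :: pvExtLast ts g

-- attach the segmentation gs (whose first group starts a new word iff b) after acc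
def pvGlue (acc : List String) (b : Bool) (gs : List (List Char)) : List String :=
  match gs with
  | [] => acc
  | g :: gs' =>
      if b then acc ++ (g :: gs').map (fun l => String.ofList l)
      else pvExtLast acc g ++ gs'.map (fun l => String.ofList l)

lemma pvAppendLast_ne_nil (ts : List String) (c : Char) (h : ts ≠ []) : pvAppendLast ts c ≠ [] := by
  match ts with
  | [] => exact absurd rfl h
  | [t] => simp [pvAppendLast]
  | t :: t' :: ts => simp [pvAppendLast]

lemma pvAppendLast_eq_extLast (ts : List String) (c : Char) : pvAppendLast ts c = pvExtLast ts [c] := by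
  match ts with
  | [] => rfl
  | [t] =>
    simp only [pvAppendLast, pvExtLast, List.cons.injEq, and_true]
    apply String.ext
    simp
  | t :: t' :: ts =>
    simp only [pvAppendLast, pvExtLast, List.cons.injEq, true_and]
    exact pvAppendLast_eq_extLast (t' :: ts) c

lemma pvExtLast_append_singleton (xs : List String) (t : String) (g : List Char) :
    pvExtLast (xs ++ [t]) g = xs ++ [String.ofList (t.toList ++ g)] := by
  induction xs with
  | nil => rfl
  | cons x xs ih =>
    match xs with
    | [] => simp [pvExtLast]
    | y :: ys => simpa [pvExtLast] using ih

lemma pvExtLast_ne_nil (ts : List String) (g : List Char) (h : ts ≠ []) : pvExtLast ts g ≠ [] := by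
  match ts with
  | [] => exact absurd rfl h
  | [t] => simp [pvExtLast]
  | t :: t' :: ts => simp [pvExtLast]

lemma pvExtLast_extLast (acc : List String) (l g : List Char) (h : acc ≠ []) :
    pvExtLast (pvExtLast acc l) g = pvExtLast acc (l ++ g) := by
  match acc with
  | [] => exact absurd rfl h
  | [t] => simp [pvExtLast]
  | t :: t' :: ts =>
    have h2 := pvExtLast_extLast (t' :: ts) l g (by simp)
    cases hx : pvExtLast (t' :: ts) l with
    | nil => exact absurd hx (pvExtLast_ne_nil _ _ (by simp))
    | cons x xs =>
      rw [hx] at h2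
      show pvExtLast (t :: pvExtLast (t' :: ts) l) g = t :: pvExtLast (t' :: ts) (l ++ g)
      rw [hx]
      simp only [pvExtLast, List.cons.injEq, true_and]
      exact h2

-- A's fold from position k ≥ 1 glues the reference segmentation onto acc
lemma pvFoldA (labels : List Int) (cs : List Char) : ∀ (k : Int) (acc : List String),
    acc ≠ [] → 1 ≤ k →
    (PySem.List.enumerate cs k).foldl (pvStepA labels) acc
      = pvGlue acc (pvBnd labels k) (pvSegM labels k cs) := by
  induction cs with
  | nil =>
    intro k acc hacc hk
    simp [PySem.List.enumerate_nil, pvSegM, pvGlue]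
  | cons c rest ih =>
    intro k acc hacc hk
    rw [PySem.List.enumerate_cons, List.foldl_cons]
    have hk0 : (k == 0) = false := by simp; omega
    have hstep : pvStepA labels acc (k, c)
        = if pvBnd labels k then acc ++ [String.ofList [c]] else pvAppendLast acc c := by
      cases hb : pvBnd labels k with
      | true =>
        have hne : PySem.List.pyGet? labels k ≠ some 1 := by
          simpa [pvBnd] using hb
        simp only [if_true]
        simp only [pvStepA, hk0, Bool.false_eq_true, if_false]
        obtain ⟨x, hx⟩ : ∃ x, PySem.List.pyGet? labels k = x := ⟨_, rfl⟩
        rw [hx] at hne ⊢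
        cases x with
        | none => rfl
        | some label => simp [show ¬ label = 1 from fun h => hne (by simp [h])]
      | false =>
        have heq : PySem.List.pyGet? labels k = some 1 := by
          by_contra hne
          simp [pvBnd, hne] at hb
        simp only [Bool.false_eq_true, if_false]
        simp only [pvStepA, hk0, Bool.false_eq_true, if_false, heq]
        simp
    rw [hstep]
    cases hb : pvBnd labels k with
    | true =>
      simp only [if_true]
      rw [ih (k + 1) (acc ++ [String.ofList [c]]) (by simp) (by omega)]
      simp only [pvSegM]
      rcases hM : pvSegM labels (k + 1) rest with _ | ⟨g, gs⟩
      · simp [pvGlue]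
      · cases hb1 : pvBnd labels (k + 1) with
        | true => simp [pvGlue]
        | false =>
          simp only [pvGlue, Bool.false_eq_true, if_false, if_true,
            pvExtLast_append_singleton]
          simp
    | false =>
      simp only [Bool.false_eq_true, if_false]
      rw [ih (k + 1) (pvAppendLast acc c) (pvAppendLast_ne_nil acc c hacc) (by omega)]
      rw [pvAppendLast_eq_extLast]
      simp only [pvSegM]
      rcases hM : pvSegM labels (k + 1) rest with _ | ⟨g, gs⟩
      · simp [pvGlue]
      · cases hb1 : pvBnd labels (k + 1) with
        | true => simp [pvGlue]
        | false =>
          simp only [pvGlue, Bool.false_eq_true, if_false,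
            pvExtLast_extLast acc [c] g hacc]
          rfl

-- A equals the reference segmentation
lemma pvA_eq_segM (sentence : List String) (labels : List Int) :
    segment_by_labels sentence labels
      = (pvSegM labels 0 (PySem.Str.join "" sentence).toList).map (fun l => String.ofList l) := by
  show List.foldl (pvStepA labels) [] (PySem.List.enumerate (PySem.Str.join "" sentence).toList 0) = _
  obtain ⟨cs, hcs⟩ : ∃ cs, (PySem.Str.join "" sentence).toList = cs := ⟨_, rfl⟩
  rw [hcs]
  cases cs with
  | nil => simp [PySem.List.enumerate_nil, pvSegM]
  | cons c rest =>
    rw [PySem.List.enumerate_cons, List.foldl_cons]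
    have h0 : pvStepA labels [] ((0 : Int), c) = [String.ofList [c]] := by
      simp [pvStepA]
    rw [h0, pvFoldA labels rest (0 + 1) [String.ofList [c]] (by simp) (by omega)]
    simp only [pvSegM]
    rcases hM : pvSegM labels (0 + 1) rest with _ | ⟨g, gs⟩
    · simp [pvGlue]
    · cases hb : pvBnd labels (0 + 1) with
      | true => simp [pvGlue]
      | false => simp [pvGlue, pvExtLast]

lemma pvSegM_cons_ne_nil (labels : List Int) (k : Int) (c : Char) (rest : List Char) :
    pvSegM labels k (c :: rest) ≠ [] := by
  simp only [pvSegM]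
  rcases pvSegM labels (k + 1) rest with _ | ⟨g, gs⟩
  · simp
  · cases pvBnd labels (k + 1) <;> simp

lemma pvSlice_cons_of_pos (c : Char) (rest : List Char) (a b : Int) (ha : 1 ≤ a) (hb : 1 ≤ b) :
    PySem.List.slice (c :: rest) (some a) (some b)
      = PySem.List.slice rest (some (a - 1)) (some (b - 1)) := by
  rw [PySem.List.slice_toNat _ (by omega) (by omega),
    PySem.List.slice_toNat _ (by omega) (by omega)]
  have h1 : a.toNat = (a - 1).toNat + 1 := by omega
  have h2 : b.toNat - ((a - 1).toNat + 1) = (b - 1).toNat - (a - 1).toNat := by omega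
  rw [h1, h2, List.drop_succ_cons]

-- B's zip-of-starts slicing equals the reference segmentation
lemma pvSliceB (labels : List Int) (cs : List Char) : ∀ (k : Int), cs ≠ [] → 0 ≤ k →
    ((k :: (PySem.List.pyRange (k + 1) (k + cs.length) 1).filter (fun pos => pvBnd labels pos)).zip
        (((PySem.List.pyRange (k + 1) (k + cs.length) 1).filter (fun pos => pvBnd labels pos)) ++ [k + cs.length])).map
      (fun p => PySem.List.slice cs (some (p.1 - k)) (some (p.2 - k)))
      = pvSegM labels k cs := by
  induction cs with
  | nil => intro k hne _; exact absurd rfl hne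
  | cons c rest ih =>
    intro k _ hk
    rcases rest with _ | ⟨c', rest'⟩
    · -- cs = [c]
      have hl1 : k + ((c :: ([] : List Char)).length : Int) = k + 1 := by simp
      rw [hl1, PySem.List.pyRange_one_eq_nil (le_refl _)]
      simp only [List.filter_nil, List.nil_append, List.zip_cons_cons, List.zip_nil_right,
        List.map_cons, List.map_nil]
      have e1 : k - k = (0 : Int) := by ring
      have e2 : k + 1 - k = (1 : Int) := by ring
      rw [e1, e2, PySem.List.slice_toNat _ (by omega) (by omega)]
      simp [pvSegM]
    · -- cs = c :: c' :: rest'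
      have hlen : k + ((c :: c' :: rest').length : Int)
          = (k + 1) + ((c' :: rest').length : Int) := by
        simp only [List.length_cons]
        push_cast
        ring
      rw [hlen]
      have hlt : k + 1 < (k + 1) + ((c' :: rest').length : Int) := by
        have : (0 : Int) < ((c' :: rest').length : Int) := by simp
        omega
      rw [PySem.List.pyRange_one_cons hlt]
      obtain ⟨F, hF⟩ : ∃ F,
          (PySem.List.pyRange (k + 1 + 1) ((k + 1) + ((c' :: rest').length : Int)) 1).filter
            (fun pos => pvBnd labels pos) = F := ⟨_, rfl⟩
      have hmemF : ∀ x ∈ F, k + 2 ≤ x := by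
        intro x hx
        rw [← hF] at hx
        have hx2 := (PySem.List.mem_pyRange_one.mp (List.mem_filter.mp hx).1).1
        omega
      have hmemFe : ∀ x ∈ F ++ [(k + 1) + ((c' :: rest').length : Int)], k + 1 ≤ x := by
        intro x hx
        rcases List.mem_append.mp hx with h | h
        · have := hmemF _ h; omega
        · have : x = (k + 1) + ((c' :: rest').length : Int) := by simpa using h
          have : (0 : Int) < ((c' :: rest').length : Int) := by simp
          omega
      have hid : ∀ p ∈ (((k + 1) :: F).zip (F ++ [(k + 1) + ((c' :: rest').length : Int)])),
          PySem.List.slice (c :: c' :: rest') (some (p.1 - k)) (some (p.2 - k))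
            = PySem.List.slice (c' :: rest') (some (p.1 - (k + 1))) (some (p.2 - (k + 1))) := by
        intro p hp
        obtain ⟨h1, h2⟩ := List.of_mem_zip hp
        have ha : 1 ≤ p.1 - k := by
          rcases List.mem_cons.mp h1 with h | h
          · omega
          · have := hmemF _ h; omega
        have hbb : 1 ≤ p.2 - k := by
          have := hmemFe _ h2; omega
        rw [pvSlice_cons_of_pos _ _ _ _ ha hbb]
        have e1 : p.1 - k - 1 = p.1 - (k + 1) := by ring
        have e2 : p.2 - k - 1 = p.2 - (k + 1) := by ring
        rw [e1, e2]
      have htail : (((k + 1) :: F).zip (F ++ [(k + 1) + ((c' :: rest').length : Int)])).map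
            (fun p => PySem.List.slice (c' :: rest') (some (p.1 - (k + 1))) (some (p.2 - (k + 1))))
          = pvSegM labels (k + 1) (c' :: rest') := by
        rw [← hF]
        exact ih (k + 1) (by simp) (by omega)
      cases hb1 : pvBnd labels (k + 1) with
      | true =>
        rw [List.filter_cons_of_pos (by simpa using hb1), hF]
        simp only [List.cons_append, List.zip_cons_cons, List.map_cons]
        rw [List.map_congr_left hid, htail]
        have e0 : k - k = (0 : Int) := by ring
        have e1 : k + 1 - k = (1 : Int) := by ring
        rw [e0, e1, PySem.List.slice_toNat _ (by omega) (by omega)]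
        rcases hM : pvSegM labels (k + 1) (c' :: rest') with _ | ⟨g, gs⟩
        · exact absurd hM (pvSegM_cons_ne_nil labels (k + 1) c' rest')
        · have hunfold : pvSegM labels k (c :: c' :: rest')
              = (match pvSegM labels (k + 1) (c' :: rest') with
                 | [] => [[c]]
                 | g :: gs => if pvBnd labels (k + 1) = true then [c] :: g :: gs else (c :: g) :: gs) := rfl
          rw [hunfold, hM]
          simp [hb1]
      | false =>
        rw [List.filter_cons_of_neg (by simpa using hb1), hF]
        obtain ⟨h, t, hht⟩ : ∃ h t,
            F ++ [(k + 1) + ((c' :: rest').length : Int)] = h :: t := by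
          rcases F with _ | ⟨f0, F'⟩
          · exact ⟨_, _, rfl⟩
          · exact ⟨_, _, rfl⟩
        have hh_ge : k + 1 ≤ h := hmemFe h (by rw [hht]; simp)
        have ht_sub : ∀ x ∈ t, x ∈ F ++ [(k + 1) + ((c' :: rest').length : Int)] := by
          intro x hx; rw [hht]; exact List.mem_cons_of_mem _ hx
        rw [hht] at htail
        rw [List.zip_cons_cons, List.map_cons] at htail
        rcases hM : pvSegM labels (k + 1) (c' :: rest') with _ | ⟨g, gs⟩
        · exact absurd hM (pvSegM_cons_ne_nil labels (k + 1) c' rest')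
        · rw [hM] at htail
          have hg : PySem.List.slice (c' :: rest') (some (k + 1 - (k + 1))) (some (h - (k + 1))) = g :=
            (List.cons.injEq _ _ _ _ ▸ htail).1
          have hgs : (F.zip t).map
              (fun p => PySem.List.slice (c' :: rest') (some (p.1 - (k + 1))) (some (p.2 - (k + 1))))
              = gs := (List.cons.injEq _ _ _ _ ▸ htail).2
          rw [hht, List.zip_cons_cons, List.map_cons]
          have hid' : ∀ p ∈ F.zip t,
              PySem.List.slice (c :: c' :: rest') (some (p.1 - k)) (some (p.2 - k))
                = PySem.List.slice (c' :: rest') (some (p.1 - (k + 1))) (some (p.2 - (k + 1))) := by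
            intro p hp
            obtain ⟨h1, h2⟩ := List.of_mem_zip hp
            have ha : 1 ≤ p.1 - k := by have := hmemF _ h1; omega
            have hbb : 1 ≤ p.2 - k := by have := hmemFe _ (ht_sub _ h2); omega
            rw [pvSlice_cons_of_pos _ _ _ _ ha hbb]
            have e1 : p.1 - k - 1 = p.1 - (k + 1) := by ring
            have e2 : p.2 - k - 1 = p.2 - (k + 1) := by ring
            rw [e1, e2]
          rw [List.map_congr_left hid', hgs]
          have hhead : PySem.List.slice (c :: c' :: rest') (some (k - k)) (some (h - k)) = c :: g := by
            rw [← hg]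
            have e0 : k - k = (0 : Int) := by ring
            have e0' : k + 1 - (k + 1) = (0 : Int) := by ring
            rw [e0, e0', PySem.List.slice_toNat _ (by omega) (by omega),
              PySem.List.slice_toNat _ (by omega) (by omega)]
            simp only [List.drop_zero, Int.toNat_zero, Nat.sub_zero]
            have e3 : (h - k).toNat = (h - (k + 1)).toNat + 1 := by omega
            rw [e3, List.take_succ_cons]
          rw [hhead]
          have hunfold : pvSegM labels k (c :: c' :: rest')
              = (match pvSegM labels (k + 1) (c' :: rest') with
                 | [] => [[c]]
                 | g :: gs => if pvBnd labels (k + 1) = true then [c] :: g :: gs else (c :: g) :: gs) := rfl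
          rw [hunfold, hM]
          simp [hb1]

-- B equals the reference segmentation
lemma pvB_eq_segM (sentence : List String) (labels : List Int) :
    segment_by_labels_alt sentence labels
      = (pvSegM labels 0 (PySem.Str.join "" sentence).toList).map (fun l => String.ofList l) := by
  show (if (PySem.Str.join "" sentence).toList.isEmpty then ([] : List String) else
      ((((0 : Int) :: (PySem.List.pyRange 1 ((PySem.Str.join "" sentence).toList.length : Int) 1).filter
            (fun pos => PySem.List.pyGet? labels pos != some 1)).zip
          (((0 : Int) :: (PySem.List.pyRange 1 ((PySem.Str.join "" sentence).toList.length : Int) 1).filter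
            (fun pos => PySem.List.pyGet? labels pos != some 1)).drop 1
            ++ [((PySem.Str.join "" sentence).toList.length : Int)])).map
        (fun p => String.ofList (PySem.List.slice (PySem.Str.join "" sentence).toList (some p.1) (some p.2)))))
    = _
  obtain ⟨cs, hcs⟩ : ∃ cs, (PySem.Str.join "" sentence).toList = cs := ⟨_, rfl⟩
  rw [hcs]
  cases cs with
  | nil => simp [pvSegM]
  | cons c rest =>
    simp only [List.isEmpty_cons, Bool.false_eq_true, if_false, List.drop_succ_cons, List.drop_zero]
    have hmm := pvSliceB labels (c :: rest) 0 (by simp) (le_refl 0)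
    rw [show (fun p : Int × Int => String.ofList (PySem.List.slice (c :: rest) (some p.1) (some p.2)))
        = (fun l => String.ofList l) ∘ (fun p : Int × Int => PySem.List.slice (c :: rest) (some p.1) (some p.2))
      from rfl, ← List.map_map]
    congr 1
    simp only [zero_add, pvBnd] at hmm
    rw [← hmm]
    apply List.map_congr_left
    intro p _
    simp

-- ===== VERDICT (by name: the statement is the Claim_ definition above) =====
theorem segment_by_labels_spec : Claim_equal_segment_by_labels := by
  intro sentence labels _ _
  unfold Spec_segment_by_labels
  rw [pvA_eq_segM, pvB_eq_segM]
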